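-- pv_equiv track=rewrite | github.com/jake-thewoz/aoc-2025 | 10.py | button_combo
-- ===== SOURCE A (Python) =====
-- import itertools
--
-- def button_combo(target_state, press_list):
--     start_state = (False,) * len(target_state)
--     target_state = tuple(char == '#' for char in target_state)
--
--     # Let's go from 1 to len(state), trying every combination of buttons
--     for r in range(1, len(target_state)+1):
--         combos = list(itertools.combinations(press_list, r))
--
--         # Each combo is a list of the button presses
--         for combo in combos:
--
--             new_state = list(start_state)
--             for press in combo:
--                 new_state = [
--                     (not value) if index in press else value
--                     for index, value in enumerate(new_state)
--                 ]
--                 if tuple(new_state) == target_state: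
--                     return r
--     return 0
-- ===== SOURCE B (Python) =====
-- def button_combo(target_state, press_list):
--     # DP over XOR states: for each reachable toggle-vector keep the minimum number
--     # of button presses (over non-empty subsets of press_list) that produces it.
--     L = len(target_state)
--     target = tuple(c == '#' for c in target_state)
--     best = {}  # toggle-vector (tuple of bools) -> min presses over non-empty subsets
--     for press in press_list:
--         vec = tuple(i in press for i in range(L))
--         updates = [(vec, 1)] + [
--             (tuple(a != b for a, b in zip(k, vec)), c + 1) for k, c in best.items()
--         ]
--         for key, cnt in updates:
--             if key not in best or cnt < best[key]:
--                 best[key] = cnt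
--     ans = best.get(target)
--     # A only tries subset sizes 1..len(target_state)
--     return 0 if ans is None or ans > L else ans
-- ===== Notes on version B (the rewrite author's own statement) =====
-- stated objective: alternative
-- what changed: Instead of enumerating all combinations of buttons by growing size, B runs a subset-XOR dynamic program: one pass over the buttons maintains a dictionary mapping each reachable toggle-vector to the minimum number of presses producing it, then looks up the target vector (capped at len(target_state), the largest size A searches).
import Mathlib
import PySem

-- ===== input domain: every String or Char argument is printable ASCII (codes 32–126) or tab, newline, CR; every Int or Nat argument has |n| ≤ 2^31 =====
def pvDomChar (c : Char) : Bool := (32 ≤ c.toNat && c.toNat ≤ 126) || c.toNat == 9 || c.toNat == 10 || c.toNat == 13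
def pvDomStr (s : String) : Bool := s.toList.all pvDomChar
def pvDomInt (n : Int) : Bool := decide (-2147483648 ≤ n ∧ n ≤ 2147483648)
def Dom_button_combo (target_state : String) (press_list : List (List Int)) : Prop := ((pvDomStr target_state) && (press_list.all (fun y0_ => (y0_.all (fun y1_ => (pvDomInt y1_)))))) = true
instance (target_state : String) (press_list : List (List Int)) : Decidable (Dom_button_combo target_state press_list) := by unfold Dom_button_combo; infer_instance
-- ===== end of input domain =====

-- B replaces A's enumeration of all button combinations by a one-pass min-presses-per-XOR-vector
-- dynamic program (objective: alternative).

-- ===== PORT A =====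
def pvApplyPress (state : List Bool) (press : List Int) : List Bool :=
  (PySem.List.enumerate state).map (fun p => if p.1 ∈ press then !p.2 else p.2)

def pvTryCombo (target : List Bool) : List Bool → List (List Int) → Bool
  | _, [] => false
  | state, press :: rest =>
    let s' := pvApplyPress state press
    if s' = target then true else pvTryCombo target s' rest

def pvOuter (target start : List Bool) (press_list : List (List Int)) : List Int → Int
  | [] => 0
  | r :: rs =>
    if (PySem.List.combinations press_list r.toNat).any (fun combo => pvTryCombo target start combo) then r
    else pvOuter target start press_list rs

def button_combo (target_state : String) (press_list : List (List Int)) : Int :=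
  let chars := target_state.toList
  let start_state := List.replicate chars.length false
  let target := chars.map (fun c => c == '#')
  pvOuter target start_state press_list (PySem.List.pyRange 1 (chars.length + 1) 1)

-- ===== PORT B =====
def pvVecOf (L : Nat) (press : List Int) : List Bool :=
  (PySem.List.pyRange 0 (L : Int) 1).map (fun i => decide (i ∈ press))

def pvMergeUpd (d : PySem.Dict (List Bool) Int) (u : List Bool × Int) : PySem.Dict (List Bool) Int :=
  match d.get? u.1 with
  | none => d.insert u.1 u.2
  | some old => if u.2 < old then d.insert u.1 u.2 else d

def pvStep (L : Nat) (best : PySem.Dict (List Bool) Int) (press : List Int) : PySem.Dict (List Bool) Int :=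
  let vec := pvVecOf L press
  let updates := (vec, (1 : Int)) ::
    best.items.map (fun p => (List.zipWith (fun a b => a != b) p.1 vec, p.2 + 1))
  updates.foldl pvMergeUpd best

def button_combo_alt (target_state : String) (press_list : List (List Int)) : Int :=
  let chars := target_state.toList
  let L := chars.length
  let target := chars.map (fun c => c == '#')
  let best := press_list.foldl (pvStep L) PySem.Dict.empty
  match best.get? target with
  | none => 0
  | some v => if v > (L : Int) then 0 else v

-- ===== PRECONDITION & SPEC =====
def Spec_button_combo (target_state : String) (press_list : List (List Int)) (out : Int) : Prop := out = button_combo_alt target_state press_list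
instance (target_state : String) (press_list : List (List Int)) (out : Int) : Decidable (Spec_button_combo target_state press_list out) := by unfold Spec_button_combo; infer_instance

-- ===== CLAIM (what is proved, stated in full; the proofs are below) =====
def Claim_equal_button_combo : Prop := ∀ (target_state : String) (press_list : List (List Int)), Dom_button_combo target_state press_list → Spec_button_combo target_state press_list (button_combo target_state press_list)

-- ===== LEMMAS AND PROOFS =====

-- proof-side vocabulary
def pvXor (a b : List Bool) : List Bool := List.zipWith (fun x y => x != y) a b

def pvState (L : Nat) (c : List (List Int)) : List Bool :=
  c.foldl (fun s p => pvXor s (pvVecOf L p)) (List.replicate L false)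

def pvSizes (L : Nat) (t : List Bool) (pl : List (List Int)) : List Int :=
  ((pl.sublists.filter (fun c => !c.isEmpty)).filter (fun c => pvState L c == t)).map
    (fun c => (c.length : Int))

def pvMin? : List Int → Option Int
  | [] => none
  | x :: l => some (match pvMin? l with | none => x | some y => min x y)

def pvOMin : Option Int → Option Int → Option Int
  | none, b => b
  | a, none => a
  | some x, some y => some (min x y)

-- pvMin? basics
lemma pvMin?_cons (x : Int) (l : List Int) : pvMin? (x :: l) = pvOMin (some x) (pvMin? l) := by
  cases h : pvMin? l <;> simp [pvMin?, pvOMin, h]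

lemma pvMin?_eq_none_iff (l : List Int) : pvMin? l = none ↔ l = [] := by
  cases l <;> simp [pvMin?]

lemma pvMin?_mem {l : List Int} {v : Int} (h : pvMin? l = some v) : v ∈ l := by
  induction l generalizing v with
  | nil => simp [pvMin?] at h
  | cons x t ih =>
    rw [pvMin?_cons] at h
    cases ht : pvMin? t with
    | none => rw [ht] at h; simp [pvOMin] at h; simp [h]
    | some y =>
      rw [ht] at h; simp [pvOMin] at h
      by_cases hxy : x ≤ y
      · simp [min_eq_left hxy] at h; simp [h]
      · rw [min_eq_right (by omega)] at h
        exact List.mem_cons_of_mem _ (ih (h ▸ ht))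

lemma pvMin?_le {l : List Int} {v : Int} (h : pvMin? l = some v) : ∀ x ∈ l, v ≤ x := by
  induction l generalizing v with
  | nil => simp
  | cons x t ih =>
    rw [pvMin?_cons] at h
    intro z hz
    cases ht : pvMin? t with
    | none =>
      rw [ht] at h; simp [pvOMin] at h
      rw [pvMin?_eq_none_iff] at ht; subst ht
      simp at hz; omega
    | some y =>
      rw [ht] at h; simp [pvOMin] at h
      rcases List.mem_cons.mp hz with rfl | hz'
      · omega
      · have := ih ht z hz'; omega

lemma pvMin?_of_mem {l : List Int} {v : Int} (h : v ∈ l) :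
    ∃ u, pvMin? l = some u ∧ u ≤ v := by
  cases hl : pvMin? l with
  | none => rw [pvMin?_eq_none_iff] at hl; subst hl; simp at h
  | some u => exact ⟨u, rfl, pvMin?_le hl v h⟩

lemma pvMin?_eq_some_iff (l : List Int) (v : Int) :
    pvMin? l = some v ↔ v ∈ l ∧ ∀ x ∈ l, v ≤ x := by
  constructor
  · intro h; exact ⟨pvMin?_mem h, pvMin?_le h⟩
  · rintro ⟨hv, hle⟩
    obtain ⟨u, hu, huv⟩ := pvMin?_of_mem hv
    have : v ≤ u := hle u (pvMin?_mem hu)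
    have : u = v := le_antisymm huv this
    rw [hu, this]

lemma pvMin?_perm {l₁ l₂ : List Int} (h : l₁.Perm l₂) : pvMin? l₁ = pvMin? l₂ := by
  cases h2 : pvMin? l₂ with
  | none =>
    rw [pvMin?_eq_none_iff] at h2 ⊢; subst h2
    exact List.Perm.eq_nil h
  | some v =>
    rw [pvMin?_eq_some_iff] at h2 ⊢
    exact ⟨h.mem_iff.mpr h2.1, fun x hx => h2.2 x (h.mem_iff.mp hx)⟩

lemma pvOMin_assoc (a b c : Option Int) : pvOMin (pvOMin a b) c = pvOMin a (pvOMin b c) := by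
  cases a <;> cases b <;> cases c <;> simp [pvOMin, min_assoc]

lemma pvMin?_append (l₁ l₂ : List Int) :
    pvMin? (l₁ ++ l₂) = pvOMin (pvMin? l₁) (pvMin? l₂) := by
  induction l₁ with
  | nil => cases h : pvMin? l₂ <;> simp [pvOMin, pvMin?, h]
  | cons x t ih => rw [List.cons_append, pvMin?_cons, ih, pvMin?_cons, pvOMin_assoc]

lemma pvMin?_map_add_one (l : List Int) :
    pvMin? (l.map (fun v => v + 1)) = (pvMin? l).map (fun v => v + 1) := by
  induction l with
  | nil => simp [pvMin?]
  | cons x t ih =>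
    rw [List.map_cons, pvMin?_cons, pvMin?_cons, ih]
    cases h : pvMin? t <;> simp [pvOMin] <;> omega

lemma pvMin?_const {l : List Int} {v : Int} (hne : l ≠ []) (h : ∀ x ∈ l, x = v) :
    pvMin? l = some v := by
  rw [pvMin?_eq_some_iff]
  cases l with
  | nil => exact absurd rfl hne
  | cons x t =>
    have hx := h x (by simp)
    exact ⟨by simp [hx], fun z hz => le_of_eq (hx ▸ (h z hz).symm ▸ hx ▸ rfl)⟩

-- length facts
lemma pvVecOf_length (L : Nat) (p : List Int) : (pvVecOf L p).length = L := by
  simp [pvVecOf, PySem.List.length_pyRange_one]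

lemma pvXor_length (a b : List Bool) : (pvXor a b).length = min a.length b.length := by
  simp [pvXor]

lemma pvState_length (L : Nat) (c : List (List Int)) : (pvState L c).length = L := by
  suffices H : ∀ (c : List (List Int)) (s : List Bool), s.length = L →
      (c.foldl (fun s p => pvXor s (pvVecOf L p)) s).length = L by
    exact H c _ (by simp)
  intro c
  induction c with
  | nil => intro s hs; simpa using hs
  | cons p t ih =>
    intro s hs
    exact ih _ (by simp [pvXor_length, pvVecOf_length, hs])

-- xor algebra
lemma pvXor_cancel (a b : List Bool) (h : a.length = b.length) : pvXor (pvXor a b) b = a := by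
  induction a generalizing b with
  | nil => simp [pvXor]
  | cons x t ih =>
    cases b with
    | nil => simp at h
    | cons y u =>
      simp only [pvXor, List.zipWith_cons_cons]
      have : ((x != y) != y) = x := by cases x <;> cases y <;> rfl
      simp only [List.length_cons, Nat.add_right_cancel_iff] at h
      simpa [this] using ih u h

lemma pvXor_eq_iff (a b m : List Bool) (ha : a.length = b.length) (hm : m.length = b.length) :
    pvXor a b = m ↔ a = pvXor m b := by
  constructor
  · intro h; rw [← h, pvXor_cancel a b ha]
  · intro h; rw [h, pvXor_cancel m b hm]

lemma pvXor_replicate_false (b : List Bool) : pvXor (List.replicate b.length false) b = b := by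
  induction b with
  | nil => rfl
  | cons y u ih => simpa [pvXor, List.replicate_succ] using ih

-- A-side: press application is xor with the press vector
lemma pvApplyPress_length (s : List Bool) (p : List Int) : (pvApplyPress s p).length = s.length := by
  simp [pvApplyPress, PySem.List.length_enumerate]

lemma pvApplyPress_eq_xor (s : List Bool) (p : List Int) :
    pvApplyPress s p = pvXor s (pvVecOf s.length p) := by
  apply List.ext_getElem
  · simp [pvApplyPress_length, pvXor_length, pvVecOf_length]
  · intro i h1 h2
    have hi : i < s.length := by simpa [pvApplyPress_length] using h1
    simp only [pvApplyPress, pvXor, pvVecOf, List.getElem_map, List.getElem_zipWith]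
    rw [PySem.List.getElem_enumerate, PySem.List.getElem_pyRange_one]
    by_cases hm : ((i : Int)) ∈ p <;> simp [hm] <;> cases s[i] <;> rfl

lemma pvFoldApply_eq (c : List (List Int)) (s : List Bool) (L : Nat) (hs : s.length = L) :
    c.foldl pvApplyPress s = c.foldl (fun s p => pvXor s (pvVecOf L p)) s := by
  induction c generalizing s with
  | nil => rfl
  | cons p t ih =>
    simp only [List.foldl_cons]
    rw [pvApplyPress_eq_xor, hs,
      ih _ (by simp [pvXor_length, pvVecOf_length, hs])]

-- A-side: the early-return inner loop fires exactly on a nonempty matching prefix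
lemma pvTryCombo_iff (t : List Bool) (c : List (List Int)) (s : List Bool) :
    pvTryCombo t s c = true ↔
      ∃ p q, c = p ++ q ∧ p ≠ [] ∧ p.foldl pvApplyPress s = t := by
  induction c generalizing s with
  | nil =>
    simp only [pvTryCombo]
    constructor
    · intro h; cases h
    · rintro ⟨p, q, hpq, hp, -⟩
      cases p with
      | nil => exact absurd rfl hp
      | cons a b => simp at hpq
  | cons press rest ih =>
    simp only [pvTryCombo]
    by_cases he : pvApplyPress s press = t
    · simp only [he, if_pos rfl]
      constructor
      · intro _; exact ⟨[press], rest, rfl, by simp, by simpa using he⟩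
      · intro _; rfl
    · rw [if_neg he, ih]
      constructor
      · rintro ⟨p, q, hpq, hp, hf⟩
        exact ⟨press :: p, q, by simp [hpq], by simp, by simpa using hf⟩
      · rintro ⟨p, q, hpq, hp, hf⟩
        cases p with
        | nil => exact absurd rfl hp
        | cons a p' =>
          injection hpq with h1 h2
          subst h1
          cases p' with
          | nil => simp at hf; exact absurd hf he
          | cons b p'' =>
            exact ⟨b :: p'', q, h2, by simp, by simpa using hf⟩

-- pvSizes membership
lemma mem_pvSizes (L : Nat) (t : List Bool) (pl : List (List Int)) (v : Int) :
    v ∈ pvSizes L t pl ↔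
      ∃ c, c.Sublist pl ∧ c ≠ [] ∧ pvState L c = t ∧ v = (c.length : Int) := by
  simp only [pvSizes, List.mem_map, List.mem_filter, List.mem_sublists]
  constructor
  · rintro ⟨c, ⟨⟨hsub, hne⟩, hst⟩, rfl⟩
    refine ⟨c, hsub, ?_, by simpa using hst, rfl⟩
    simpa using hne
  · rintro ⟨c, hsub, hne, hst, rfl⟩
    exact ⟨c, ⟨⟨hsub, by simpa using hne⟩, by simpa using hst⟩, rfl⟩

lemma pvSizes_length_of_mem {L : Nat} {t : List Bool} {pl : List (List Int)} {v : Int}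
    (h : v ∈ pvSizes L t pl) : t.length = L := by
  obtain ⟨c, -, -, hst, -⟩ := (mem_pvSizes L t pl v).mp h
  rw [← hst, pvState_length]

-- fire characterisations
lemma fire_exists_size {L : Nat} {target start : List Bool} {pl : List (List Int)} {r : Nat}
    (hstart : start = List.replicate L false)
    (h : (PySem.List.combinations pl r).any (fun combo => pvTryCombo target start combo) = true) :
    ∃ v ∈ pvSizes L target pl, v ≤ (r : Int) := by
  obtain ⟨combo, hc, ht⟩ := List.any_eq_true.mp h
  obtain ⟨hsub, hlen⟩ := (PySem.List.mem_combinations_iff pl r combo).mp hc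
  obtain ⟨p, q, rfl, hp, hf⟩ := (pvTryCombo_iff target _ start).mp ht
  have hps : p.Sublist pl :=
    ((List.prefix_append p q).sublist).trans hsub
  have hstate : pvState L p = target := by
    rw [← hf, pvFoldApply_eq p start L (by simp [hstart])]
    simp [pvState, hstart]
  refine ⟨(p.length : Int), (mem_pvSizes L target pl _).mpr ⟨p, hps, hp, hstate, rfl⟩, ?_⟩
  have := (List.sublist_append_left p q).length_le
  omega

lemma size_fire {L : Nat} {target start : List Bool} {pl : List (List Int)}
    (hstart : start = List.replicate L false)
    {c : List (List Int)} (hsub : c.Sublist pl) (hne : c ≠ []) (hst : pvState L c = target) :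
    (PySem.List.combinations pl c.length).any (fun combo => pvTryCombo target start combo) = true := by
  refine List.any_eq_true.mpr ⟨c, (PySem.List.mem_combinations_iff pl c.length c).mpr ⟨hsub, rfl⟩, ?_⟩
  refine (pvTryCombo_iff target c start).mpr ⟨c, [], by simp, hne, ?_⟩
  rw [pvFoldApply_eq c start L (by simp [hstart])]
  simpa [pvState, hstart] using hst

-- outer loop lemmas
lemma pvOuter_none (t s : List Bool) (pl : List (List Int)) :
    ∀ rs : List Int,
      (∀ r ∈ rs, (PySem.List.combinations pl r.toNat).any (fun combo => pvTryCombo t s combo) = false) →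
      pvOuter t s pl rs = 0 := by
  intro rs
  induction rs with
  | nil => intro _; rfl
  | cons r rest ih =>
    intro h
    simp only [pvOuter, h r (by simp)]
    exact ih (fun x hx => h x (by simp [hx]))

lemma pvOuter_first (t s : List Bool) (pl : List (List Int)) (v b : Int)
    (hfire : (PySem.List.combinations pl v.toNat).any (fun combo => pvTryCombo t s combo) = true)
    (hnot : ∀ r : Int, 1 ≤ r → r < v →
      (PySem.List.combinations pl r.toNat).any (fun combo => pvTryCombo t s combo) = false) :
    ∀ (k : Nat) (a : Int), (v - a).toNat = k → 1 ≤ a → a ≤ v → v < b →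
      pvOuter t s pl (PySem.List.pyRange a b 1) = v := by
  intro k
  induction k with
  | zero =>
    intro a hk h1 hav hvb
    have hav' : a = v := by omega
    subst hav'
    rw [PySem.List.pyRange_one_cons (by omega)]
    simp [pvOuter, hfire]
  | succ k ih =>
    intro a hk h1 hav hvb
    have hlt : a < v := by omega
    rw [PySem.List.pyRange_one_cons (by omega)]
    simp only [pvOuter, hnot a h1 hlt, Bool.false_eq_true, if_false]
    exact ih (a + 1) (by omega) (by omega) (by omega) hvb

-- A computes: the minimum matching subset size, capped at the state length
lemma button_combo_eq (target_state : String) (pl : List (List Int)) :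
    button_combo target_state pl =
      (match pvMin? (pvSizes target_state.toList.length
          (target_state.toList.map (fun c => c == '#')) pl) with
       | none => 0
       | some v => if v > (target_state.toList.length : Int) then 0 else v) := by
  set L := target_state.toList.length with hL
  set target := target_state.toList.map (fun c => c == '#') with htarget
  show pvOuter target (List.replicate L false) pl (PySem.List.pyRange 1 ((L : Int) + 1) 1) = _
  cases hmin : pvMin? (pvSizes L target pl) with
  | none =>
    rw [pvMin?_eq_none_iff] at hmin
    refine pvOuter_none _ _ _ _ (fun r _ => ?_)
    by_contra h
    obtain ⟨v, hv, -⟩ := fire_exists_size (L := L) rfl (Bool.of_not_eq_false h)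
    simp [hmin] at hv
  | some v =>
    have hv := pvMin?_mem hmin
    have hle := pvMin?_le hmin
    obtain ⟨c, hsub, hne, hst, rfl⟩ := (mem_pvSizes L target pl v).mp hv
    have hc1 : 1 ≤ (c.length : Int) := by
      cases c with
      | nil => exact absurd rfl hne
      | cons _ _ => simp
    have hnot : ∀ r : Int, 1 ≤ r → r < (c.length : Int) →
        (PySem.List.combinations pl r.toNat).any (fun combo => pvTryCombo target (List.replicate L false) combo) = false := by
      intro r h1 hr
      by_contra h
      obtain ⟨u, hu, hur⟩ := fire_exists_size (L := L) rfl (Bool.of_not_eq_false h)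
      have := hle u hu
      omega
    have hmatch : (match some ((c.length : Int)) with
        | none => (0 : Int) | some v => if v > (L : Int) then 0 else v)
        = if (c.length : Int) > (L : Int) then (0 : Int) else (c.length : Int) := rfl
    rw [hmatch]
    by_cases hcap : (c.length : Int) > (L : Int)
    · rw [if_pos hcap]
      refine pvOuter_none _ _ _ _ (fun r hr => ?_)
      have hr' := (PySem.List.mem_pyRange_one).mp hr
      exact hnot r hr'.1 (by omega)
    · rw [if_neg hcap]
      have hfire := size_fire (L := L) rfl hsub hne hst
      have htn : ((c.length : Int)).toNat = c.length := by omega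
      exact pvOuter_first target _ pl (c.length : Int) ((L : Int) + 1)
        (by rw [htn]; exact hfire) hnot ((c.length : Int) - 1).toNat 1 (by omega) (by omega) hc1
        (by omega)

-- B-side: min-merge of one update
lemma pvOMin_comm (a b : Option Int) : pvOMin a b = pvOMin b a := by
  cases a <;> cases b <;> simp [pvOMin, min_comm]

lemma pvMergeUpd_get? (d : PySem.Dict (List Bool) Int) (u : List Bool × Int) (m : List Bool) :
    (pvMergeUpd d u).get? m = if u.1 = m then pvOMin (d.get? m) (some u.2) else d.get? m := by
  cases hg : d.get? u.1 with
  | none =>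
    simp only [pvMergeUpd, hg]
    by_cases h : u.1 = m
    · subst h; rw [if_pos rfl, PySem.Dict.get?_insert_self]; simp [hg, pvOMin]
    · rw [if_neg h, PySem.Dict.get?_insert, if_neg (fun x => h x.symm)]
  | some old =>
    simp only [pvMergeUpd, hg]
    by_cases h : u.1 = m
    · subst h
      rw [if_pos rfl]
      by_cases hlt : u.2 < old
      · rw [if_pos hlt, PySem.Dict.get?_insert_self]; simp [hg, pvOMin]; omega
      · rw [if_neg hlt]; simp [hg, pvOMin]; omega
    · rw [if_neg h]
      by_cases hlt : u.2 < old
      · rw [if_pos hlt, PySem.Dict.get?_insert, if_neg (fun x => h x.symm)]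
      · rw [if_neg hlt]

-- B-side: the whole update loop, per key
lemma foldl_pvMergeUpd_get? (u : List (List Bool × Int)) (d : PySem.Dict (List Bool) Int)
    (m : List Bool) :
    (u.foldl pvMergeUpd d).get? m
      = pvOMin (d.get? m) (pvMin? ((u.filter (fun q => q.1 == m)).map (·.2))) := by
  induction u generalizing d with
  | nil => cases h : d.get? m <;> simp [pvMin?, pvOMin, h]
  | cons x t ih =>
    rw [List.foldl_cons, ih, pvMergeUpd_get?]
    by_cases h : x.1 = m
    · rw [if_pos h, pvOMin_assoc, List.filter_cons_of_pos (by simpa using h), List.map_cons,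
        pvMin?_cons]
    · rw [if_neg h, List.filter_cons_of_neg (by simpa using h)]

lemma pvMergeUpd_nodup (d : PySem.Dict (List Bool) Int) (u : List Bool × Int)
    (h : d.keys.Nodup) : (pvMergeUpd d u).keys.Nodup := by
  cases hg : d.get? u.1 with
  | none =>
    simp only [pvMergeUpd, hg]
    exact PySem.Dict.nodup_keys_insert _ _ _ h
  | some old =>
    simp only [pvMergeUpd, hg]
    by_cases hlt : u.2 < old
    · rw [if_pos hlt]; exact PySem.Dict.nodup_keys_insert _ _ _ h
    · rw [if_neg hlt]; exact h

lemma foldl_pvMergeUpd_nodup (u : List (List Bool × Int)) (d : PySem.Dict (List Bool) Int)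
    (h : d.keys.Nodup) : (u.foldl pvMergeUpd d).keys.Nodup := by
  induction u generalizing d with
  | nil => exact h
  | cons x t ih => exact ih _ (pvMergeUpd_nodup d x h)

lemma pvStep_nodup (L : Nat) (d : PySem.Dict (List Bool) Int) (p : List Int)
    (h : d.keys.Nodup) : (pvStep L d p).keys.Nodup := by
  unfold pvStep
  exact foldl_pvMergeUpd_nodup _ _ h

-- with distinct keys, filtering the items at one key reads off get?
lemma items_filter_key' (l : List (List Bool × Int)) (hnd : (l.map (·.1)).Nodup) (w : List Bool) :
    l.filter (fun q => q.1 == w)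
      = (match (PySem.Dict.mk l).get? w with | none => [] | some v => [(w, v)]) := by
  induction l with
  | nil => rfl
  | cons x t ih =>
    obtain ⟨k, v⟩ := x
    simp only [List.map_cons, List.nodup_cons] at hnd
    rw [PySem.Dict.get?_mk_cons]
    by_cases h : k = w
    · subst h
      rw [List.filter_cons_of_pos (by simp), if_pos (by simp)]
      have ht : t.filter (fun q => q.1 == k) = [] := by
        rw [List.filter_eq_nil_iff]
        intro q hq hqk
        exact hnd.1 (List.mem_map.mpr ⟨q, hq, by simpa using hqk⟩)
      rw [ht]
    · rw [List.filter_cons_of_neg (by simpa using h), if_neg (by simpa using h)]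
      exact ih hnd.2

lemma items_filter_key (d : PySem.Dict (List Bool) Int) (hnd : d.keys.Nodup) (w : List Bool) :
    d.items.filter (fun q => q.1 == w)
      = (match d.get? w with | none => [] | some v => [(w, v)]) := by
  obtain ⟨l⟩ := d
  exact items_filter_key' l (by simpa [PySem.Dict.keys_mk] using hnd) w

-- appending one press to the pool: how the candidate minima change
lemma pvState_nil (L : Nat) : pvState L [] = List.replicate L false := rfl

lemma pvState_concat (L : Nat) (c : List (List Int)) (p : List Int) :
    pvState L (c ++ [p]) = pvXor (pvState L c) (pvVecOf L p) := by
  simp [pvState, List.foldl_append]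

lemma pvSizes_nil_of_len_ne (L : Nat) (m : List Bool) (pl : List (List Int))
    (hm : m.length ≠ L) : pvSizes L m pl = [] := by
  rw [List.eq_nil_iff_forall_not_mem]
  intro v hv
  exact hm (pvSizes_length_of_mem hv)

lemma pvSizes_concat_min (L : Nat) (m : List Bool) (pl : List (List Int)) (p : List Int)
    (hm : m.length = L) :
    pvMin? (pvSizes L m (pl ++ [p]))
      = pvOMin (pvMin? (pvSizes L m pl))
          (pvOMin (if pvVecOf L p = m then some 1 else none)
            ((pvMin? (pvSizes L (pvXor m (pvVecOf L p)) pl)).map (fun v => v + 1))) := by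
  set vec := pvVecOf L p with hvec
  set w := pvXor m vec with hw
  have hvl : vec.length = L := pvVecOf_length L p
  have hwl : w.length = L := by rw [hw, pvXor_length]; omega
  -- unfold the new candidate list
  rw [pvSizes, List.sublists_concat, List.filter_append, List.filter_append, List.map_append,
    pvMin?_append]
  congr 1
  -- the fresh candidates: every old sublist extended by p
  have h1 : (List.map (· ++ [p]) pl.sublists).filter (fun c => !c.isEmpty)
      = List.map (· ++ [p]) pl.sublists := by
    rw [List.filter_eq_self]
    rintro x hx
    obtain ⟨c, -, rfl⟩ := List.mem_map.mp hx
    simp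
  rw [h1, List.filter_map, List.map_map]
  have h2 : (fun c => pvState L c == m) ∘ (· ++ [p]) = fun c => pvState L c == w := by
    funext c
    show (pvState L (c ++ [p]) == m) = (pvState L c == w)
    rw [pvState_concat]
    apply Bool.eq_iff_iff.mpr
    simp only [beq_iff_eq]
    exact pvXor_eq_iff (pvState L c) vec m (by rw [pvState_length]; omega) (by omega)
  rw [h2]
  have h3 : (fun c => (c.length : Int)) ∘ (· ++ [p]) = fun c : List (List Int) => (c.length : Int) + 1 := by
    funext c; simp
  rw [h3]
  -- split the old sublists into nonempty ones and the empty one(s)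
  have hperm : (pl.sublists.filter (fun c => pvState L c == w)).Perm
      (((pl.sublists.filter (fun c => !c.isEmpty)) ++ (pl.sublists.filter (fun c => !(!c.isEmpty)))).filter
        (fun c => pvState L c == w)) :=
    (List.Perm.filter _ (List.filter_append_perm _ pl.sublists)).symm
  rw [pvMin?_perm (hperm.map _), List.filter_append, List.map_append, pvMin?_append]
  rw [pvOMin_comm]
  congr 1
  · -- empty sublists contribute exactly "press p alone"
    set E := pl.sublists.filter (fun c => !(!c.isEmpty)) with hE
    have hEmem : ∀ x ∈ E, x = ([] : List (List Int)) := by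
      intro x hx
      have := (List.mem_filter.mp hx).2
      simpa using this
    have hEne : ([] : List (List Int)) ∈ E := by
      rw [hE, List.mem_filter]
      exact ⟨List.mem_sublists.mpr (List.nil_sublist pl), by simp⟩
    have hrep : pvXor (List.replicate L false) vec = vec := by
      have h0 := pvXor_replicate_false vec
      rw [hvl] at h0
      exact h0
    have hiff : (pvXor m vec = List.replicate L false) ↔ m = vec := by
      rw [pvXor_eq_iff m vec (List.replicate L false) (by omega) (by simp [hvl]), hrep]
    have hcond : (vec = m) ↔ (pvState L ([] : List (List Int)) == w) = true := by
      rw [pvState_nil]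
      simp only [beq_iff_eq, hw]
      constructor
      · intro h; exact (hiff.mpr h.symm).symm
      · intro h; exact (hiff.mp h.symm).symm
    by_cases hvm : vec = m
    · rw [if_pos hvm]
      have hfilter : E.filter (fun c => pvState L c == w) = E := by
        rw [List.filter_eq_self]
        intro x hx
        rw [hEmem x hx]
        exact hcond.mp hvm
      rw [hfilter]
      refine pvMin?_const (fun h0 => by rw [List.map_eq_nil_iff] at h0; rw [h0] at hEne; simp at hEne) ?_
      intro x hx
      obtain ⟨c, hc, rfl⟩ := List.mem_map.mp hx
      rw [hEmem c hc]
      simp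
    · rw [if_neg hvm]
      have hfilter : E.filter (fun c => pvState L c == w) = [] := by
        rw [List.filter_eq_nil_iff]
        intro x hx hq
        rw [hEmem x hx] at hq
        exact hvm (hcond.mpr hq)
      rw [hfilter]
      rfl
  · -- nonempty sublists: exactly the old minima, shifted by one
    rw [show (fun c : List (List Int) => (c.length : Int) + 1)
        = (fun v : Int => v + 1) ∘ (fun c : List (List Int) => (c.length : Int)) from rfl,
      ← List.map_map, pvMin?_map_add_one]
    rfl

-- one pvStep preserves the dictionary invariant
lemma pvStep_get? (L : Nat) (pl : List (List Int)) (p : List Int)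
    (d : PySem.Dict (List Bool) Int) (hnd : d.keys.Nodup)
    (hget : ∀ m, d.get? m = pvMin? (pvSizes L m pl)) (m : List Bool) :
    (pvStep L d p).get? m = pvMin? (pvSizes L m (pl ++ [p])) := by
  have hlen : ∀ q ∈ d.items, (q.1 : List Bool).length = L := by
    rintro ⟨k, c⟩ hq
    have hk : d.get? k = some c := PySem.Dict.get?_of_mem_items d hq hnd
    rw [hget k] at hk
    exact pvSizes_length_of_mem (pvMin?_mem hk)
  have hvl : (pvVecOf L p).length = L := pvVecOf_length L p
  show ((((pvVecOf L p, (1 : Int)) ::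
      d.items.map (fun q => (pvXor q.1 (pvVecOf L p), q.2 + 1)))).foldl pvMergeUpd d).get? m
    = pvMin? (pvSizes L m (pl ++ [p]))
  rw [foldl_pvMergeUpd_get?, hget m]
  by_cases hm : m.length = L
  · rw [pvSizes_concat_min L m pl p hm]
    congr 1
    -- the updates at key m
    have hshift : (d.items.map (fun q => (pvXor q.1 (pvVecOf L p), q.2 + 1))).filter
        (fun q => q.1 == m)
        = (d.items.filter (fun q => q.1 == pvXor m (pvVecOf L p))).map
            (fun q => (pvXor q.1 (pvVecOf L p), q.2 + 1)) := by
      rw [List.filter_map]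
      congr 1
      apply List.filter_congr
      intro q hq
      show (pvXor q.1 (pvVecOf L p) == m) = (q.1 == pvXor m (pvVecOf L p))
      apply Bool.eq_iff_iff.mpr
      simp only [beq_iff_eq]
      exact pvXor_eq_iff q.1 (pvVecOf L p) m (by rw [hlen q hq]; omega) (by omega)
    by_cases hvm : pvVecOf L p = m
    · rw [List.filter_cons_of_pos (by simpa using hvm), List.map_cons, pvMin?_cons, if_pos hvm]
      congr 1
      rw [hshift, items_filter_key d hnd, hget]
      cases hmin : pvMin? (pvSizes L (pvXor m (pvVecOf L p)) pl) <;> simp [pvMin?]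
    · rw [List.filter_cons_of_neg (by simpa using hvm), if_neg hvm]
      rw [hshift, items_filter_key d hnd, hget]
      show pvMin? _ = pvOMin none _
      cases hmin : pvMin? (pvSizes L (pvXor m (pvVecOf L p)) pl) <;> simp [pvMin?, pvOMin]
  · -- a key of the wrong length is never produced and never reachable
    have h0 : pvSizes L m pl = [] := pvSizes_nil_of_len_ne L m pl hm
    have h1 : pvSizes L m (pl ++ [p]) = [] := pvSizes_nil_of_len_ne L m (pl ++ [p]) hm
    rw [h0, h1]
    have h2 : (((pvVecOf L p, (1 : Int)) ::
        d.items.map (fun q => (pvXor q.1 (pvVecOf L p), q.2 + 1)))).filter (fun q => q.1 == m)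
        = [] := by
      rw [List.filter_eq_nil_iff]
      intro q hq hqm
      rcases List.mem_cons.mp hq with rfl | hq'
      · exact hm (by rw [← (by simpa using hqm : pvVecOf L p = m)]; exact hvl)
      · obtain ⟨r, hr, rfl⟩ := List.mem_map.mp hq'
        have : (pvXor r.1 (pvVecOf L p)).length = L := by
          rw [pvXor_length, hlen r hr, hvl]; omega
        exact hm (by rw [← (by simpa using hqm : pvXor r.1 (pvVecOf L p) = m)]; exact this)
    rw [h2]
    rfl

-- the dictionary after the whole pass
lemma pvDict_inv (L : Nat) (pl : List (List Int)) :
    (pl.foldl (pvStep L) PySem.Dict.empty).keys.Nodup ∧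
      ∀ m, (pl.foldl (pvStep L) PySem.Dict.empty).get? m = pvMin? (pvSizes L m pl) := by
  induction pl using List.reverseRecOn with
  | nil =>
    simp only [List.foldl_nil]
    refine ⟨by simp [PySem.Dict.keys_empty], ?_⟩
    intro m
    rw [PySem.Dict.get?_empty]
    symm
    rw [pvMin?_eq_none_iff]
    simp [pvSizes]
  | append_singleton pl p ih =>
    rw [List.foldl_append]
    refine ⟨pvStep_nodup L _ p ih.1, ?_⟩
    intro m
    exact pvStep_get? L pl p _ ih.1 ih.2 m

-- B computes the same capped minimum
lemma button_combo_alt_eq (target_state : String) (pl : List (List Int)) :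
    button_combo_alt target_state pl =
      (match pvMin? (pvSizes target_state.toList.length
          (target_state.toList.map (fun c => c == '#')) pl) with
       | none => 0
       | some v => if v > (target_state.toList.length : Int) then 0 else v) := by
  show (match (pl.foldl (pvStep target_state.toList.length) PySem.Dict.empty).get?
      (target_state.toList.map (fun c => c == '#')) with
    | none => (0 : Int)
    | some v => if v > (target_state.toList.length : Int) then 0 else v) = _
  rw [(pvDict_inv target_state.toList.length pl).2]

-- ===== VERDICT (by name: the statement is the Claim_ definition above) =====
theorem button_combo_spec : Claim_equal_button_combo := by
  intro target_state press_list _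
  show button_combo target_state press_list = button_combo_alt target_state press_list
  rw [button_combo_eq, button_combo_alt_eq]
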